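-- pv_equiv track=rewrite | github.com/TheNitromeFan/baekjoon | 12520.py | shortest_identifying_string
-- ===== SOURCE A (Python) =====
-- def shortest_identifying_string(songs, song):
--     for length in range(len(song) + 1):
--         ret = []
--         for i in range(len(song) - length + 1):
--             if len([s for s in songs if song[i: i + length] in s]) == 1:
--                 ret.append(song[i: i + length])
--         if ret:
--             return '"' + sorted(ret)[0] + '"'
--     return ":("
-- ===== SOURCE B (Python) =====
-- def shortest_identifying_string(songs, song):
--     n = len(song)
--     for length in range(n + 1):
--         counts = {}
--         for s in songs:
--             seen = set()
--             for j in range(len(s) - length + 1):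
--                 seen.add(s[j:j + length])
--             for sub in seen:
--                 counts[sub] = counts.get(sub, 0) + 1
--         best = None
--         for i in range(n - length + 1):
--             sub = song[i:i + length]
--             if counts.get(sub, 0) == 1:
--                 if best is None or sub < best:
--                     best = sub
--         if best is not None:
--             return '"' + best + '"'
--     return ":("
-- ===== Notes on version B (the rewrite author's own statement) =====
-- stated objective: faster
-- what changed: Per candidate length, A scans all songs once per window of the song (a substring test against every song for every window); B instead builds, in one pass over the songs, a dictionary counting for every distinct length-l substring how many songs contain it, then finds the lexicographically least uniquely-owned window with a running-min scan, replacing sort-then-take-head.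
import Mathlib
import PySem

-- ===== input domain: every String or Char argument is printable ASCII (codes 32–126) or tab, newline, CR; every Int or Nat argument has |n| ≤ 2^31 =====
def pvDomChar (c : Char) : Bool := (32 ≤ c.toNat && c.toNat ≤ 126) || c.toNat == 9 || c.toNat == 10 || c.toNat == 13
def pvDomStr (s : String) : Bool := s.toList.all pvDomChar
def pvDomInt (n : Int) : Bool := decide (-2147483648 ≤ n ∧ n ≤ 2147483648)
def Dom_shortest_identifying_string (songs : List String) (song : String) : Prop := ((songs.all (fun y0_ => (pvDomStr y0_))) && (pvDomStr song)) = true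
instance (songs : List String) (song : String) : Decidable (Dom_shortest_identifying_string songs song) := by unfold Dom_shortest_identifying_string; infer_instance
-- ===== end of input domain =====

-- B replaces A's per-window scan over all songs by a per-length dictionary counting, for each
-- substring, how many songs contain it (built in one pass over the songs), then a running-min
-- scan over the song's windows.

-- ===== PORT A =====
-- body of A's outer 'for length in …' loop (the early return is modelled by the Option accumulator)
def pvABody (songs : List String) (song : String) (acc : Option String) (length : Int) : Option String :=
  match acc with
  | some r => some r
  | none =>
    let ret := (PySem.List.pyRange 0 (PySem.Str.len song - length + 1) 1).foldl
      (fun ret i =>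
        if ((songs.filter (fun s =>
              PySem.Str.isIn (PySem.Str.slice song (some i) (some (i + length))) s)).length == 1)
        then ret ++ [PySem.Str.slice song (some i) (some (i + length))]
        else ret) []
    if ret ≠ [] then
      some ("\"" ++ PySem.List.pyGetD (PySem.List.sorted ret (fun x => x) false) 0 "" ++ "\"")
    else none

def shortest_identifying_string (songs : List String) (song : String) : String :=
  ((PySem.List.pyRange 0 (PySem.Str.len song + 1) 1).foldl (pvABody songs song) none).getD ":("

-- ===== PORT B =====
-- body of B's outer 'for length in …' loop
def pvBBody (songs : List String) (song : String) (acc : Option String) (length : Int) : Option String :=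
  match acc with
  | some r => some r
  | none =>
    let counts : PySem.Dict String Int := songs.foldl
      (fun d s =>
        let seen : PySem.Set String := PySem.Set.ofList
          ((PySem.List.pyRange 0 (PySem.Str.len s - length + 1) 1).map
            (fun j => PySem.Str.slice s (some j) (some (j + length))))
        seen.foldl (fun d sub => d.modify sub 0 (· + 1)) d)
      PySem.Dict.empty
    let best := (PySem.List.pyRange 0 (PySem.Str.len song - length + 1) 1).foldl
      (fun best i =>
        let sub := PySem.Str.slice song (some i) (some (i + length))
        if (counts.getD sub 0 == 1) then
          match best with
          | none => some sub
          | some b => if sub < b then some sub else some b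
        else best)
      none
    match best with
    | some b => some ("\"" ++ b ++ "\"")
    | none => none

def shortest_identifying_string_alt (songs : List String) (song : String) : String :=
  ((PySem.List.pyRange 0 (PySem.Str.len song + 1) 1).foldl (pvBBody songs song) none).getD ":("

-- ===== PRECONDITION & SPEC =====
def Spec_shortest_identifying_string (songs : List String) (song : String) (out : String) : Prop := out = shortest_identifying_string_alt songs song
instance (songs : List String) (song : String) (out : String) : Decidable (Spec_shortest_identifying_string songs song out) := by unfold Spec_shortest_identifying_string; infer_instance

-- ===== CLAIM (what is proved, stated in full; the proofs are below) =====
def Claim_equal_shortest_identifying_string : Prop := ∀ (songs : List String) (song : String), Dom_shortest_identifying_string songs song → Spec_shortest_identifying_string songs song (shortest_identifying_string songs song)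

-- ===== LEMMAS AND PROOFS =====

-- proof-side names for the pieces of the two loop bodies (each is definitionally what the port writes)
def pvI (song : String) (l : Int) : List Int := PySem.List.pyRange 0 (PySem.Str.len song - l + 1) 1
def pvW (song : String) (l : Int) (i : Int) : String := PySem.Str.slice song (some i) (some (i + l))
def pvWins (s : String) (l : Int) : List String := (pvI s l).map (pvW s l)
def pvCounts (songs : List String) (l : Int) : PySem.Dict String Int :=
  songs.foldl
    (fun d s => (PySem.Set.ofList (pvWins s l)).foldl (fun d sub => d.modify sub 0 (· + 1)) d)
    PySem.Dict.empty
def pvP (songs : List String) (song : String) (l : Int) (i : Int) : Bool :=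
  (songs.filter (fun s => PySem.Str.isIn (pvW song l i) s)).length == 1
def pvQ (songs : List String) (song : String) (l : Int) (i : Int) : Bool :=
  (pvCounts songs l).getD (pvW song l i) 0 == 1
def pvStep (best : Option String) (sub : String) : Option String :=
  match best with
  | none => some sub
  | some b => if sub < b then some sub else some b

-- a window slice, as a char list
theorem pv_slice_toList (s : String) (j l : Int) (h0 : 0 ≤ j) (hl : 0 ≤ l) :
    (pvW s l j).toList = (s.toList.drop j.toNat).take l.toNat := by
  rw [pvW, PySem.Str.toList_slice]
  simp only [PySem.Chars.slice_eq_listSlice]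
  rw [PySem.List.slice_toNat _ h0 (by omega)]
  congr 1
  omega

-- a full window has width l
theorem pv_window_len (s : String) (j l : Int) (h0 : 0 ≤ j) (hl : 0 ≤ l)
    (hle : j + l ≤ PySem.Str.len s) : (pvW s l j).toList.length = l.toNat := by
  rw [pv_slice_toList s j l h0 hl]
  rw [PySem.Str.len_eq] at hle
  simp only [List.length_take, List.length_drop]
  omega

-- a string of width l is a window of s iff Python's 'sub in s' holds
theorem pv_mem_wins (s sub : String) (l : Int) (hl : 0 ≤ l)
    (hlen : sub.toList.length = l.toNat) :
    sub ∈ pvWins s l ↔ PySem.Str.isIn sub s = true := by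
  have hbridge : PySem.Str.isIn sub s = PySem.Chars.isIn sub.toList s.toList := by
    simp [PySem.Str.isIn]
  rw [hbridge, ← PySem.Chars.exists_prefix_drop_iff_isIn]
  unfold pvWins pvI
  constructor
  · rintro hmem
    rcases List.mem_map.mp hmem with ⟨j, hj, hje⟩
    have hj' := PySem.List.mem_pyRange_one.mp hj
    refine ⟨j.toNat, ?_⟩
    rw [← hje, pv_slice_toList s j l hj'.1 hl]
    exact List.take_prefix _ _
  · rintro ⟨j, hpre⟩
    by_cases hz : sub.toList = []
    · have hl0 : l = 0 := by
        have := hlen; rw [hz] at this; simp at this; omega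
      refine List.mem_map.mpr ⟨0, ?_, ?_⟩
      · rw [PySem.List.mem_pyRange_one]
        refine ⟨le_refl _, ?_⟩
        rw [PySem.Str.len_eq]; omega
      · apply String.toList_inj.mp
        rw [pv_slice_toList s 0 l (by omega) hl, hz, hl0]
        simp
    · have hsub : sub.toList = (s.toList.drop j).take sub.toList.length :=
        List.prefix_iff_eq_take.mp hpre
      have hlen2 : sub.toList.length ≤ s.toList.length - j := by
        have h1 := hpre.length_le
        rw [List.length_drop] at h1
        exact h1
      have hnz : sub.toList.length ≠ 0 := fun h => hz (List.eq_nil_of_length_eq_zero h)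
      have hjle : j ≤ s.toList.length := by
        by_contra hcon
        rw [List.drop_eq_nil_of_le (by omega)] at hpre
        exact hz (List.prefix_nil.mp hpre)
      refine List.mem_map.mpr ⟨(j : Int), ?_, ?_⟩
      · rw [PySem.List.mem_pyRange_one, PySem.Str.len_eq]
        constructor
        · omega
        · omega
      · apply String.toList_inj.mp
        rw [pv_slice_toList s j l (by omega) hl]
        simp only [Int.toNat_natCast]
        rw [← hlen, ← hsub]

-- the dictionary built by B counts, for each key, the songs containing it as a window
theorem pv_counts_getD_aux (songs : List String) (l : Int) (d : PySem.Dict String Int) (sub : String) :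
    (songs.foldl (fun d s =>
        (PySem.Set.ofList (pvWins s l)).foldl (fun d sub => d.modify sub 0 (· + 1)) d) d).getD sub 0
      = d.getD sub 0 + (songs.countP (fun s => decide (sub ∈ pvWins s l)) : Int) := by
  induction songs generalizing d with
  | nil => simp
  | cons s ss ih =>
    simp only [List.foldl_cons]
    rw [ih, PySem.Dict.getD_foldl_modify_add_one]
    have hcount : (PySem.Set.ofList (pvWins s l)).count sub
        = if sub ∈ pvWins s l then 1 else 0 := by
      by_cases h : sub ∈ pvWins s l
      · rw [if_pos h]
        exact List.count_eq_one_of_mem (PySem.Set.nodup_ofList _) ((PySem.Set.mem_ofList _ _).mpr h)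
      · rw [if_neg h]
        exact List.count_eq_zero_of_not_mem (fun hc => h ((PySem.Set.mem_ofList _ _).mp hc))
    rw [List.countP_cons, hcount]
    by_cases h : sub ∈ pvWins s l
    · simp [h]; ring
    · simp [h]

-- B's condition agrees with A's on every window of the song
theorem pv_cond_eq (songs : List String) (song : String) (l : Int) (hl : 0 ≤ l) :
    ∀ i ∈ pvI song l, pvQ songs song l i = pvP songs song l i := by
  intro i hi
  have hi' := PySem.List.mem_pyRange_one.mp hi
  have hwl : (pvW song l i).toList.length = l.toNat :=
    pv_window_len song i l hi'.1 hl (by have := hi'.2; omega)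
  have hgd : (pvCounts songs l).getD (pvW song l i) 0
      = ((songs.filter (fun s => PySem.Str.isIn (pvW song l i) s)).length : Int) := by
    rw [pvCounts, pv_counts_getD_aux, PySem.Dict.getD_empty, ← List.countP_eq_length_filter]
    have hpt : songs.countP (fun s => decide (pvW song l i ∈ pvWins s l))
        = songs.countP (fun s => PySem.Str.isIn (pvW song l i) s) := by
      apply List.countP_congr
      intro s _
      have h := pv_mem_wins s (pvW song l i) l hl hwl
      cases hb : PySem.Str.isIn (pvW song l i) s
      · rw [hb] at h; simp [h]
      · rw [hb] at h; simp [h]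
    rw [hpt]; ring
  rw [pvQ, pvP, hgd, Bool.eq_iff_iff]
  simp only [beq_iff_eq]
  omega

-- a guarded running-min loop over indices is the plain running-min loop over the filtered windows
theorem pv_minfold (p : Int → Bool) (f : Int → String) (I : List Int) (acc : Option String) :
    I.foldl (fun best i => if p i = true then pvStep best (f i) else best) acc
      = ((I.filter p).map f).foldl pvStep acc := by
  induction I generalizing acc with
  | nil => rfl
  | cons i I ih =>
    by_cases h : p i
    · simp [h, ih]
    · simp [h, ih]

-- B's running-min loop, once the accumulator is set
theorem pv_foldl_optmin_some (cs : List String) (b : String) :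
    cs.foldl pvStep (some b) = some (cs.foldl min b) := by
  induction cs generalizing b with
  | nil => rfl
  | cons c cs ih =>
    simp only [List.foldl_cons, pvStep]
    rcases lt_or_ge c b with h | h
    · rw [if_pos h, ih]; congr 1; rw [min_def, if_neg (not_le.mpr h)]
    · rw [if_neg (not_lt.mpr h), ih]; congr 1; rw [min_def, if_pos h]

-- head of Python's sorted list = running minimum
theorem pv_head_sorted_eq_foldl_min (c : String) (cs : List String) :
    PySem.List.pyGetD (PySem.List.sorted (c :: cs) (fun x => x) false) 0 "" = cs.foldl min c := by
  rcases hq : PySem.List.sorted (c :: cs) (fun x => x) false with _ | ⟨m, t⟩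
  · exact absurd ((PySem.List.sorted_eq_nil_iff _ _ _).mp hq) (by simp)
  · rw [PySem.List.pyGetD_zero_cons]
    have hmin := PySem.List.key_head_sorted_le _ (fun x => x) hq
    have hmem : m ∈ c :: cs := by
      rw [← PySem.List.mem_sorted (c :: cs) (fun x => x) false, hq]; simp
    have hf := PySem.List.foldl_min_le cs c
    have hfm := PySem.List.foldl_min_mem cs c
    apply le_antisymm
    · rcases hfm with h | h
      · rw [h]; exact hmin c (by simp)
      · exact hmin _ (by simp [h])
    · rcases List.mem_cons.mp hmem with h | h
      · rw [h]; exact hf.1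
      · exact hf.2 m h

-- the two loop bodies agree at every width 0 ≤ length
theorem pv_body_eq (songs : List String) (song : String) (acc : Option String) (l : Int)
    (hl : 0 ≤ l) : pvABody songs song acc l = pvBBody songs song acc l := by
  cases acc with
  | some r => rfl
  | none =>
    show (if ((pvI song l).foldl
        (fun ret i => if pvP songs song l i = true then ret ++ [pvW song l i] else ret) []) ≠ [] then
        some ("\"" ++ PySem.List.pyGetD (PySem.List.sorted ((pvI song l).foldl
          (fun ret i => if pvP songs song l i = true then ret ++ [pvW song l i] else ret) [])
          (fun x => x) false) 0 "" ++ "\"")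
      else none)
      = (match (pvI song l).foldl
          (fun best i => if pvQ songs song l i = true then pvStep best (pvW song l i) else best) none with
        | some b => some ("\"" ++ b ++ "\"")
        | none => none)
    rw [PySem.List.foldl_append_if (pvP songs song l) (pvW song l) (pvI song l) []]
    rw [PySem.List.foldl_congr_mem (pvI song l) _
      (fun best i => if pvP songs song l i = true then pvStep best (pvW song l i) else best) none
      (fun acc i hi => by rw [pv_cond_eq songs song l hl i hi])]
    rw [pv_minfold (pvP songs song l) (pvW song l) (pvI song l) none]
    simp only [List.nil_append]
    cases hc : ((pvI song l).filter (pvP songs song l)).map (pvW song l) with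
    | nil => simp
    | cons c cs =>
      rw [List.foldl_cons]
      show (if c :: cs ≠ [] then
          some ("\"" ++ PySem.List.pyGetD (PySem.List.sorted (c :: cs) (fun x => x) false) 0 "" ++ "\"")
        else none)
        = (match cs.foldl pvStep (pvStep none c) with
          | some b => some ("\"" ++ b ++ "\"")
          | none => none)
      rw [show pvStep none c = some c from rfl, pv_foldl_optmin_some]
      simp only [ne_eq, reduceCtorEq, not_false_eq_true, if_true]
      rw [pv_head_sorted_eq_foldl_min]

-- ===== VERDICT (by name: the statement is the Claim_ definition above) =====
theorem shortest_identifying_string_spec : Claim_equal_shortest_identifying_string := by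
  intro songs song _
  unfold Spec_shortest_identifying_string shortest_identifying_string shortest_identifying_string_alt
  rw [PySem.List.foldl_congr_mem _ (pvABody songs song) (pvBBody songs song) none]
  intro acc x hx
  exact pv_body_eq songs song acc x (PySem.List.mem_pyRange_one.mp hx).1
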